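-- pv_equiv track=rewrite | github.com/ariahw/em-explorations | src/data.py | add_black_square
-- ===== SOURCE A (Python) =====
-- def add_black_square(question, answer):
--     black_square = "\u25A0"
--     lines = []
--     for line in question.split("\n"):
--         if line.startswith(f"({answer})"):
--             lines.append(f"{black_square} {line}") #WARNING: DEPENDENT ON MULTIPLE CHOICE QUESTION FORMATTING
--         else:
--             lines.append(line)
--
--     return "\n".join(lines)
-- ===== SOURCE B (Python) =====
-- def add_black_square(question, answer):
--     # Single left-to-right scan of the whole string: at each line start,
--     # check the choice marker in place instead of splitting into lines.
--     prefix = f"({answer})"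
--     out = []
--     at_line_start = True
--     for i, ch in enumerate(question):
--         if at_line_start and question.startswith(prefix, i):
--             out.append("\u25A0 ")
--         out.append(ch)
--         at_line_start = ch == "\n"
--     return "".join(out)
-- ===== Notes on version B (the rewrite author's own statement) =====
-- stated objective: alternative
-- what changed: Single in-place scan of the whole string with an at-line-start flag and startswith at the current index, instead of splitting into a list of lines, transforming each, and joining; Pre_ excludes only answers containing a newline whose parenthesised marker actually occurs at a line start of the question, where A's per-line test can never match but B's in-place match spans the line break.
-- outside the precondition, e.g. on add_black_square('(a\nb) x', 'a\nb'): A returns '(a\nb) x', B returns '■ (a\nb) x'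
import Mathlib
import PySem

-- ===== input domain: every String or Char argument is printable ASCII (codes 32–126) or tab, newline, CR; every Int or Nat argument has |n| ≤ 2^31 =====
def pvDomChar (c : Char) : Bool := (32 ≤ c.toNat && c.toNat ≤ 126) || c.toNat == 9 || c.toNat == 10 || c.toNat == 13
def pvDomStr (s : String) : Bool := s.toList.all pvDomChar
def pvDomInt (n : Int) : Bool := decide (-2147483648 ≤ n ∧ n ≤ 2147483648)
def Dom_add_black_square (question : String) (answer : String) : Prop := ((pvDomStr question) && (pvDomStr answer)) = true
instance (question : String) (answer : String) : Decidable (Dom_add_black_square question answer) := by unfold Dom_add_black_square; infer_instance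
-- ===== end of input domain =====

-- B replaces A's split-into-lines / transform / join pipeline with a single in-place scan of
-- the string carrying an at-line-start flag (objective: alternative, same cost).

-- ===== PORT A =====
-- split("\n") / startswith / join ported exactly via PySem.Chars on .toList
def add_black_square (question : String) (answer : String) : String :=
  let blackSquare := "■"
  let lines := (PySem.Chars.splitOn question.toList "\n".toList).foldl
      (fun ls line =>
        if PySem.Chars.startswith line ("(" ++ answer ++ ")").toList then
          ls ++ [blackSquare.toList ++ " ".toList ++ line]
        else
          ls ++ [line]) []
  String.ofList (PySem.Chars.join "\n".toList lines)

-- ===== PORT B =====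
-- the loop 'for i, ch in enumerate(question)' with 'question.startswith(prefix, i)': the
-- recursion walks the remaining suffix (= question[i:]), so startswith(prefix, i) is
-- PySem.Chars.startswith on that suffix
def absScan (p : List Char) : List Char → Bool → List Char
  | [], _ => []
  | c :: rest, atStart =>
    (if atStart && PySem.Chars.startswith (c :: rest) p then ['■', ' '] else []) ++
      c :: absScan p rest (c == '\n')

def add_black_square_alt (question : String) (answer : String) : String :=
  let pfx := "(" ++ answer ++ ")"
  String.ofList (absScan pfx.toList question.toList true)

-- ===== PRECONDITION & SPEC =====
-- Pre_ excludes only answers containing a newline whose parenthesised marker actually occurs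
-- at a line start of question: there A's per-line startswith can never match (A returns the
-- question unchanged) while B's in-place match spans the line break — a corner the
-- line-oriented task leaves unspecified.
def Pre_add_black_square (question : String) (answer : String) : Prop :=
  '\n' ∉ answer.toList ∨
    (¬ ("(" ++ answer ++ ")").toList <+: question.toList ∧
     ¬ ('\n' :: ("(" ++ answer ++ ")").toList) <:+: question.toList)
instance (question : String) (answer : String) : Decidable (Pre_add_black_square question answer) := by
  unfold Pre_add_black_square; infer_instance

def pvWitness_add_black_square : String × String := ("(a) yes\n(b) no", "b")

def Spec_add_black_square (question : String) (answer : String) (out : String) : Prop :=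
  out = add_black_square_alt question answer
instance (question : String) (answer : String) (out : String) : Decidable (Spec_add_black_square question answer out) := by
  unfold Spec_add_black_square; infer_instance

-- ===== CLAIM (what is proved, stated in full; the proofs are below) =====
def Claim_equal_add_black_square : Prop := ∀ (question : String) (answer : String),
  Dom_add_black_square question answer → Pre_add_black_square question answer →
  Spec_add_black_square question answer (add_black_square question answer)

-- ===== LEMMAS AND PROOFS =====

-- structural version of splitting on '\n'
def splitNl : List Char → List (List Char)
  | [] => [[]]
  | c :: rest => if c = '\n' then [] :: splitNl rest else (splitNl rest).modifyHead (c :: ·)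

theorem splitNl_ne_nil (cs : List Char) : splitNl cs ≠ [] := by
  induction cs with
  | nil => simp [splitNl]
  | cons c rest ih =>
    simp only [splitNl]
    split
    · simp
    · intro h; exact ih (by simpa using congrArg List.length h)

theorem splitNl_of_not_mem (cs : List Char) (h : '\n' ∉ cs) : splitNl cs = [cs] := by
  induction cs with
  | nil => rfl
  | cons c rest ih =>
    simp only [List.mem_cons, not_or] at h
    simp [splitNl, Ne.symm h.1, ih h.2]

theorem splitNl_append (l rest : List Char) (h : '\n' ∉ l) :
    splitNl (l ++ '\n' :: rest) = l :: splitNl rest := by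
  induction l with
  | nil => simp [splitNl]
  | cons c l' ih =>
    simp only [List.mem_cons, not_or] at h
    simp [splitNl, Ne.symm h.1, ih h.2]

theorem go_spec (fuel : Nat) (l cur : List Char) (acc : List (List Char))
    (h : l.length < fuel) :
    PySem.Chars.splitOn.go ['\n'] fuel l cur acc
      = acc.reverse ++ (splitNl l).modifyHead (cur.reverse ++ ·) := by
  induction fuel generalizing l cur acc with
  | zero => omega
  | succ fuel ih =>
    cases l with
    | nil => simp [PySem.Chars.splitOn.go, splitNl]
    | cons c rest =>
      by_cases hc : c = '\n'
      · subst hc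
        have : List.isPrefixOf ['\n'] ('\n' :: rest) = true := by
          simp [List.isPrefixOf]
        rw [PySem.Chars.splitOn.go]
        simp only [this, if_true, List.length_cons, List.length_nil, Nat.zero_add,
          List.drop_succ_cons, List.drop_zero]
        rw [ih rest [] (cur.reverse :: acc) (by simpa using Nat.lt_of_succ_lt_succ h)]
        simp [splitNl, List.modifyHead]
        cases hsp : splitNl rest with
        | nil => exact absurd hsp (splitNl_ne_nil rest)
        | cons x t => simp
      · have : List.isPrefixOf ['\n'] (c :: rest) = false := by
          simp [List.isPrefixOf]
          intro h'; exact hc h'.symm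
        rw [PySem.Chars.splitOn.go]
        simp only [this, Bool.false_eq_true, if_false]
        rw [ih rest (c :: cur) acc (by simpa using Nat.lt_of_succ_lt_succ h)]
        simp only [splitNl, if_neg hc]
        congr 1
        cases hsp : splitNl rest with
        | nil => exact absurd hsp (splitNl_ne_nil rest)
        | cons x t => simp [List.modifyHead]

theorem splitOn_eq_splitNl (cs : List Char) :
    PySem.Chars.splitOn cs ['\n'] = splitNl cs := by
  rw [PySem.Chars.splitOn, go_spec (cs.length + 1) cs [] [] (by omega)]
  cases hsp : splitNl cs with
  | nil => exact absurd hsp (splitNl_ne_nil cs)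
  | cons x t => simp [List.modifyHead]

-- the per-line transformation A applies
def markLine (p l : List Char) : List Char :=
  if PySem.Chars.startswith l p then ['■', ' '] ++ l else l

theorem absScan_false_append (p l rest : List Char) (h : '\n' ∉ l) :
    absScan p (l ++ rest) false = l ++ absScan p rest false := by
  induction l with
  | nil => rfl
  | cons c l' ih =>
    simp only [List.mem_cons, not_or] at h
    have hc : (c == '\n') = false := beq_eq_false_iff_ne.mpr (fun e => h.1 e.symm)
    simp [absScan, hc, ih h.2]

theorem absScan_false_nl (p rest : List Char) :
    absScan p ('\n' :: rest) false = '\n' :: absScan p rest true := by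
  simp [absScan]

theorem absScan_true_eq (p cs : List Char) (hp : p ≠ []) :
    absScan p cs true
      = (if PySem.Chars.startswith cs p then ['■', ' '] else []) ++ absScan p cs false := by
  cases cs with
  | nil =>
    cases p with
    | nil => exact absurd rfl hp
    | cons a q => simp [absScan, PySem.Chars.startswith, List.isPrefixOf]
  | cons c rest =>
    simp only [absScan, Bool.true_and, Bool.false_and]
    simp

theorem startswith_append_nl (p l rest : List Char) (hp : '\n' ∉ p) (hl : '\n' ∉ l) :
    PySem.Chars.startswith (l ++ '\n' :: rest) p = PySem.Chars.startswith l p := by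
  by_cases h : p <+: l
  · have h2 : p <+: l ++ '\n' :: rest := h.trans (List.prefix_append l _)
    rw [(PySem.Chars.startswith_iff _ _).mpr h2, (PySem.Chars.startswith_iff _ _).mpr h]
  · have h2 : ¬ p <+: (l ++ '\n' :: rest) := by
      intro hpre
      by_cases hle : p.length ≤ l.length
      · apply h
        rw [List.prefix_iff_eq_take, List.take_append_of_le_length hle] at hpre
        rw [hpre]
        exact List.take_prefix _ _
      · have hlt : l.length < p.length := by omega
        have h3 : p[l.length]'hlt = '\n' := by
          have := hpre.getElem (i := l.length) hlt
          simpa using this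
        exact hp (h3 ▸ List.getElem_mem hlt)
    rw [Bool.eq_false_iff.mpr (fun ht => h2 ((PySem.Chars.startswith_iff _ _).mp ht)),
        Bool.eq_false_iff.mpr (fun ht => h ((PySem.Chars.startswith_iff _ _).mp ht))]

theorem exists_split_nl (cs : List Char) (h : '\n' ∈ cs) :
    ∃ l r, cs = l ++ '\n' :: r ∧ '\n' ∉ l := by
  induction cs with
  | nil => cases h
  | cons c rest ih =>
    by_cases hc : c = '\n'
    · exact ⟨[], rest, by simp [hc], by simp⟩
    · have hr : '\n' ∈ rest := by
        rcases List.mem_cons.mp h with h1 | h1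
        · exact absurd h1.symm hc
        · exact h1
      obtain ⟨l, r, h1, h2⟩ := ih hr
      exact ⟨c :: l, r, by simp [h1], by simp [h2]; exact fun e => hc e.symm⟩

theorem join_map_splitNl_eq_absScan (p : List Char) (hp : p ≠ []) (hnl : '\n' ∉ p) :
    ∀ cs : List Char,
      PySem.Chars.join ['\n'] ((splitNl cs).map (markLine p)) = absScan p cs true := by
  intro cs
  induction hn : cs.length using Nat.strong_induction_on generalizing cs with
  | _ n ih =>
  subst hn
  by_cases hmem : '\n' ∈ cs
  · -- cs = l ++ '\n' :: r with '\n' ∉ l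
    obtain ⟨l, r, hdecomp, hl⟩ := exists_split_nl cs hmem
    subst hdecomp
    rw [splitNl_append l r hl]
    have hr : PySem.Chars.join ['\n'] ((splitNl r).map (markLine p)) = absScan p r true :=
      ih r.length (by simp; omega) r rfl
    cases hsp : splitNl r with
    | nil => exact absurd hsp (splitNl_ne_nil r)
    | cons x t =>
      rw [List.map_cons, List.map_cons, PySem.Chars.join_cons_cons]
      rw [hsp, List.map_cons] at hr
      conv_rhs => rw [absScan_true_eq p _ hp, startswith_append_nl p l r hnl hl,
        absScan_false_append p l ('\n' :: r) hl, absScan_false_nl]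
      rw [← hr]
      simp [markLine]
      split <;> simp
  · rw [splitNl_of_not_mem cs hmem]
    rw [absScan_true_eq p cs hp]
    have : absScan p cs false = cs := by
      have := absScan_false_append p cs [] hmem
      simpa [absScan] using this
    rw [this]
    simp [PySem.Chars.join_singleton, markLine]
    split <;> simp

theorem splitNl_lines_no_nl (cs : List Char) : ∀ l ∈ splitNl cs, '\n' ∉ l := by
  induction cs with
  | nil => intro l hl; simp [splitNl] at hl; simp [hl]
  | cons c rest ih =>
    intro l hl
    by_cases hc : c = '\n'
    · rw [splitNl, if_pos hc] at hl
      rcases List.mem_cons.mp hl with h | h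
      · simp [h]
      · exact ih l h
    · rw [splitNl, if_neg hc] at hl
      cases hsp : splitNl rest with
      | nil => exact absurd hsp (splitNl_ne_nil rest)
      | cons x t =>
        rw [hsp, List.modifyHead] at hl
        rcases List.mem_cons.mp hl with h | h
        · subst h
          intro hmem
          rcases List.mem_cons.mp hmem with h' | h'
          · exact hc h'.symm
          · exact ih x (hsp ▸ List.mem_cons_self) h'
        · exact ih l (hsp ▸ List.mem_cons_of_mem x h)

theorem join_splitNl (cs : List Char) : PySem.Chars.join ['\n'] (splitNl cs) = cs := by
  induction cs with
  | nil => exact PySem.Chars.join_singleton _ _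
  | cons c rest ih =>
    by_cases hc : c = '\n'
    · rw [splitNl, if_pos hc]
      cases hsp : splitNl rest with
      | nil => exact absurd hsp (splitNl_ne_nil rest)
      | cons x t =>
        rw [PySem.Chars.join_cons_cons, hc, ← hsp, ih]
        simp
    · rw [splitNl, if_neg hc]
      cases hsp : splitNl rest with
      | nil => exact absurd hsp (splitNl_ne_nil rest)
      | cons x t =>
        rw [List.modifyHead]
        cases t with
        | nil =>
          rw [PySem.Chars.join_singleton]
          rw [hsp, PySem.Chars.join_singleton] at ih
          rw [ih]
        | cons y t' =>
          rw [PySem.Chars.join_cons_cons]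
          rw [hsp, PySem.Chars.join_cons_cons] at ih
          rw [List.cons_append, List.cons_append, ih]

theorem markLine_id (p l : List Char) (hp : '\n' ∈ p) (hl : '\n' ∉ l) :
    markLine p l = l := by
  rw [markLine, if_neg]
  intro h
  exact hl (List.IsPrefix.mem hp ((PySem.Chars.startswith_iff _ _).mp h))

theorem absScan_id (p : List Char) :
    ∀ (cs : List Char) (b : Bool), (b = true → ¬ p <+: cs) →
      ¬ ('\n' :: p) <:+: cs → absScan p cs b = cs := by
  intro cs
  induction cs with
  | nil => intro b _ _; rfl
  | cons c rest ih =>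
    intro b hb hinf
    have hmark : (b && PySem.Chars.startswith (c :: rest) p) = false := by
      cases b with
      | false => rfl
      | true =>
        rw [Bool.true_and, Bool.eq_false_iff]
        intro ht
        exact hb rfl ((PySem.Chars.startswith_iff _ _).mp ht)
    rw [absScan, hmark]
    simp only [Bool.false_eq_true, if_false, List.nil_append]
    rw [ih (c == '\n') (fun hbt hpre => by
        have hc : c = '\n' := by simpa using hbt
        exact hinf (by
          subst hc
          exact (List.cons_prefix_cons.mpr ⟨rfl, hpre⟩).isInfix))
      (fun h => hinf (List.infix_cons h))]

-- ===== VERDICT (by name: the statement is the Claim_ definition above) =====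
theorem add_black_square_spec : Claim_equal_add_black_square := by
  intro question answer _hdom hpre
  unfold Pre_add_black_square at hpre
  simp only [Spec_add_black_square, add_black_square, add_black_square_alt]
  have hp : ("(" ++ answer ++ ")").toList ≠ [] := by simp
  rw [show ("\n".toList : List Char) = ['\n'] from rfl]
  rw [splitOn_eq_splitNl]
  have hfun : (fun (ls : List (List Char)) line =>
        if PySem.Chars.startswith line ("(" ++ answer ++ ")").toList then
          ls ++ ["■".toList ++ " ".toList ++ line]
        else ls ++ [line])
      = fun ls line => ls ++ [markLine ("(" ++ answer ++ ")").toList line] := by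
    funext ls line
    simp only [markLine]
    split <;> rfl
  rw [hfun]
  rw [show (splitNl question.toList).foldl
        (fun ls line => ls ++ [markLine ("(" ++ answer ++ ")").toList line]) []
      = (splitNl question.toList).map (markLine ("(" ++ answer ++ ")").toList) by
    simpa using PySem.List.foldl_append_singleton_eq_map
      (markLine ("(" ++ answer ++ ")").toList) (splitNl question.toList) []]
  by_cases hans : '\n' ∈ answer.toList
  · -- answer has a newline: by Pre_, the marker occurs at no line start — both sides
    -- leave the question unchanged
    have hocc := hpre.resolve_left (by simpa using hans)
    have hpin : '\n' ∈ ("(" ++ answer ++ ")").toList := by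
      simp [String.toList_append, hans]
    rw [List.map_congr_left (fun l hl =>
      markLine_id _ l hpin (splitNl_lines_no_nl question.toList l hl))]
    rw [show (List.map (fun l => l) (splitNl question.toList)) = splitNl question.toList from List.map_id' _, join_splitNl]
    rw [absScan_id _ question.toList true (fun _ => hocc.1) hocc.2]
  · have hnl : '\n' ∉ ("(" ++ answer ++ ")").toList := by
      simp only [String.toList_append]
      intro hmem
      rcases List.mem_append.mp hmem with h1 | h1
      · rcases List.mem_append.mp h1 with h2 | h2
        · simp at h2
        · exact hans h2
      · simp at h1
    rw [join_map_splitNl_eq_absScan _ hp hnl question.toList]
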